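-- pv_equiv track=rewrite | github.com/AlexGrek/offloadmq | offload-agent/app/systeminfo.py | _shorten_gpu_model_for_display
-- ===== SOURCE A (Python) =====
-- from typing import Optional, Dict, Any, List, Tuple
--
-- def _fit_words(words: List[str], max_len: int) -> str:
--     """Join words up to max_len without cutting mid-word."""
--     result = ""
--     for word in words:
--         candidate = f"{result} {word}" if result else word
--         if len(candidate) > max_len:
--             break
--         result = candidate
--     return result or words[0] if words else ""
--
-- def _shorten_gpu_model_for_display(model: str, max_len: int) -> str:
--     """Drop leading vendor fluff so long names fit the display name cap. Never cuts mid-word."""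
--     words = model.split()
--     priority = ("RTX", "GTX", "RX", "ARC", "QUADRO", "RADEON", "GEFORCE")
--     for token in priority:
--         for i, w in enumerate(words):
--             if w.upper() == token:
--                 return _fit_words(words[i:], max_len)
--     return _fit_words(words, max_len)
-- ===== SOURCE B (Python) =====
-- from typing import List
--
-- def _fit_words(words: List[str], max_len: int) -> str:
--     """Join words up to max_len without cutting mid-word."""
--     result = ""
--     for word in words:
--         candidate = f"{result} {word}" if result else word
--         if len(candidate) > max_len:
--             break
--         result = candidate
--     return result or words[0] if words else ""
--
-- def _shorten_gpu_model_for_display(model: str, max_len: int) -> str: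
--     """Single pass: rank table + running minimum instead of a priority x words rescan."""
--     words = model.split()
--     priority = ("RTX", "GTX", "RX", "ARC", "QUADRO", "RADEON", "GEFORCE")
--     rank = {token: i for i, token in enumerate(priority)}
--     best_rank = None
--     best_index = None
--     for i, w in enumerate(words):
--         r = rank.get(w.upper())
--         if r is not None and (best_rank is None or r < best_rank):
--             best_rank, best_index = r, i
--     if best_index is not None:
--         return _fit_words(words[best_index:], max_len)
--     return _fit_words(words, max_len)
-- ===== Notes on version B (the rewrite author's own statement) =====
-- stated objective: alternative
-- what changed: Replaced A's nested priority-by-words rescan (for each of the 7 tokens, a full enumerate pass with early return) by building a token->rank table once and doing a single pass over the words keeping the running minimum rank (strict < preserves the first occurrence), then fitting from the chosen index.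
import Mathlib
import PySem

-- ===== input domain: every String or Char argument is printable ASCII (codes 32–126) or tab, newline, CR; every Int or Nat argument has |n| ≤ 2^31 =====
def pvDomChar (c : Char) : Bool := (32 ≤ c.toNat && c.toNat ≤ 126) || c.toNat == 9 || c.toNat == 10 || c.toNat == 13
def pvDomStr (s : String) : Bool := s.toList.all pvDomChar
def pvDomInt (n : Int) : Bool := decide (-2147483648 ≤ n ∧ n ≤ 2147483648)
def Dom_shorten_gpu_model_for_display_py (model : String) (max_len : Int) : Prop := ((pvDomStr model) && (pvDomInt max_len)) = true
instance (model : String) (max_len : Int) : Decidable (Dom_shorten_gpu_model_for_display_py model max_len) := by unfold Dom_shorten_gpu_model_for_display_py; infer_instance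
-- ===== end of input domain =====

-- B replaces A's priority×words rescan by a rank table plus one linear pass keeping the running minimum rank (alternative single-pass decomposition).


-- ===== PORT A =====
-- shared helper `_fit_words` (B reuses it unchanged)
def fitLoop : List String → Int → String → String
  | [], _, result => result
  | word :: ws, max_len, result =>
    let candidate := if result ≠ "" then PySem.Str.join " " [result, word] else word
    if PySem.Str.len candidate > max_len then result
    else fitLoop ws max_len candidate

def fit_words (words : List String) (max_len : Int) : String :=
  let result := fitLoop words max_len ""
  match words with
  | [] => ""
  | w :: _ => if result ≠ "" then result else w

def pvPriority : List String := ["RTX", "GTX", "RX", "ARC", "QUADRO", "RADEON", "GEFORCE"]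

-- inner `for i, w in enumerate(words): if w.upper() == token: return …`
def findTok (token : String) : List (Int × String) → Option Int
  | [] => none
  | (i, w) :: rest => if PySem.Str.upper w == token then some i else findTok token rest

-- outer `for token in priority: …` (early return = first hit)
def scanA (words : List String) : List String → Option Int
  | [] => none
  | t :: ts =>
    match findTok t (PySem.List.enumerate words 0) with
    | some i => some i
    | none => scanA words ts

def shorten_gpu_model_for_display_py (model : String) (max_len : Int) : String :=
  let words := PySem.Str.split₀ model
  match scanA words pvPriority with
  | some i => fit_words (PySem.List.slice words (some i) none) max_len
  | none => fit_words words max_len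

-- ===== PORT B =====
-- rank = {token: i for i, token in enumerate(priority)}
def rankDict : PySem.Dict String Int :=
  PySem.Dict.ofList ((PySem.List.enumerate pvPriority 0).map (fun p => (p.2, p.1)))

-- loop body: r = rank.get(w.upper()); if r is not None and (best_rank is None or r < best_rank): update
def stepB (best : Option Int × Option Int) (p : Int × String) : Option Int × Option Int :=
  match rankDict.get? (PySem.Str.upper p.2) with
  | none => best
  | some r =>
    match best.1 with
    | none => (some r, some p.1)
    | some br => if r < br then (some r, some p.1) else best

def shorten_gpu_model_for_display_py_alt (model : String) (max_len : Int) : String :=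
  let words := PySem.Str.split₀ model
  let best := (PySem.List.enumerate words 0).foldl stepB (none, none)
  match best.2 with
  | some i => fit_words (PySem.List.slice words (some i) none) max_len
  | none => fit_words words max_len

-- ===== PRECONDITION & SPEC =====
def Spec_shorten_gpu_model_for_display_py (model : String) (max_len : Int) (out : String) : Prop := out = shorten_gpu_model_for_display_py_alt model max_len
instance (model : String) (max_len : Int) (out : String) : Decidable (Spec_shorten_gpu_model_for_display_py model max_len out) := by unfold Spec_shorten_gpu_model_for_display_py; infer_instance

-- ===== CLAIM (what is proved, stated in full; the proofs are below) =====
def Claim_equal_shorten_gpu_model_for_display_py : Prop := ∀ (model : String) (max_len : Int), Dom_shorten_gpu_model_for_display_py model max_len → Spec_shorten_gpu_model_for_display_py model max_len (shorten_gpu_model_for_display_py model max_len)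

-- ===== LEMMAS AND PROOFS =====

-- rank of an (already uppercased) token, as A's if-chain sees it
def rankFun (u : String) : Option Int :=
  if "RTX" == u then some 0 else if "GTX" == u then some 1 else if "RX" == u then some 2
  else if "ARC" == u then some 3 else if "QUADRO" == u then some 4 else if "RADEON" == u then some 5
  else if "GEFORCE" == u then some 6 else none

def rkW (w : String) : Option Int := rankFun (PySem.Str.upper w)

-- first index (counting from s) whose rank is exactly k
def fw (k : Int) (s : Int) : List (Option Int) → Option Int
  | [] => none
  | r :: rs => if r = some k then some s else fw k (s + 1) rs

-- minimum defined rank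
def minR : List (Option Int) → Option Int
  | [] => none
  | none :: rs => minR rs
  | some r :: rs => match minR rs with | none => some r | some m => some (min r m)

-- pure recursion equal to B's foldl
def runB (acc : Option Int × Option Int) (s : Int) : List (Option Int) → Option Int × Option Int
  | [] => acc
  | r? :: rs =>
    runB (match r? with
          | none => acc
          | some r =>
            match acc.1 with
            | none => (some r, some s)
            | some br => if r < br then (some r, some s) else acc) (s + 1) rs

theorem rankDict_get (u : String) : rankDict.get? u = rankFun u := by
  have h : rankDict = PySem.Dict.mk [("RTX", 0), ("GTX", 1), ("RX", 2), ("ARC", 3),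
      ("QUADRO", 4), ("RADEON", 5), ("GEFORCE", 6)] := by decide
  rw [h]
  simp only [PySem.Dict.get?_mk_cons, rankFun, beq_iff_eq]
  split_ifs <;> rfl

theorem rankFun_bound (u : String) (k : Int) (h : rankFun u = some k) : 0 ≤ k ∧ k < 7 := by
  unfold rankFun at h
  split_ifs at h <;> simp_all <;> omega

theorem findTok_eq (t : String) (k : Int) (ht : ∀ u, rankFun u = some k ↔ u = t) :
    ∀ (ws : List String) (s : Int), findTok t (PySem.List.enumerate ws s) = fw k s (ws.map rkW) := by
  intro ws
  induction ws with
  | nil => intro s; simp [PySem.List.enumerate_nil, findTok, fw]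
  | cons w ws ih =>
    intro s
    rw [PySem.List.enumerate_cons]
    simp only [findTok, List.map, fw]
    by_cases hc : rkW w = some k
    · have ht' : PySem.Str.upper w = t := (ht _).mp hc
      simp [ht', hc]
    · have ht' : ¬ PySem.Str.upper w = t := by
        intro e
        exact hc (by rw [rkW, e]; exact (ht _).mpr rfl)
      simp [ht', hc, ih]

theorem fw_eq_none (k : Int) (rs : List (Option Int)) (h : some k ∉ rs) :
    ∀ s, fw k s rs = none := by
  induction rs with
  | nil => intro s; simp [fw]
  | cons r rs ih =>
    intro s
    simp only [List.mem_cons, not_or] at h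
    simp [fw, Ne.symm h.1, ih h.2]

theorem fw_isSome (k : Int) (rs : List (Option Int)) (h : some k ∈ rs) :
    ∀ s, (fw k s rs).isSome := by
  induction rs with
  | nil => simp at h
  | cons r rs ih =>
    intro s
    by_cases hr : r = some k
    · simp [fw, hr]
    · simp only [List.mem_cons] at h
      rcases h with h | h
      · exact absurd h.symm hr
      · simp [fw, hr, ih h]

theorem minR_none (rs : List (Option Int)) (h : minR rs = none) : ∀ k, some k ∉ rs := by
  induction rs with
  | nil => simp
  | cons r rs ih =>
    intro k
    match r with
    | none =>
      simp only [minR] at h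
      simp [ih h]
    | some r0 =>
      simp only [minR] at h
      split at h <;> simp_all

theorem minR_mem (rs : List (Option Int)) : ∀ (m : Int), minR rs = some m → some m ∈ rs := by
  induction rs with
  | nil => intro m h; simp [minR] at h
  | cons r rs ih =>
    intro m h
    match r with
    | none =>
      simp only [minR] at h
      simp [ih m h]
    | some r0 =>
      simp only [minR] at h
      rcases hm' : minR rs with _ | m' <;> rw [hm'] at h <;> simp only [Option.some.injEq] at h
      · simp [h]
      · rcases le_total r0 m' with hc | hc
        · rw [min_eq_left hc] at h
          simp [h]
        · rw [min_eq_right hc] at h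
          subst h
          exact List.mem_cons_of_mem _ (ih m' hm')

theorem minR_le (rs : List (Option Int)) : ∀ (m : Int), minR rs = some m →
    ∀ k, some k ∈ rs → m ≤ k := by
  induction rs with
  | nil => simp
  | cons r rs ih =>
    intro m h k hk
    simp only [List.mem_cons] at hk
    match r with
    | none =>
      simp only [minR] at h
      rcases hk with hk | hk
      · exact absurd hk (by simp)
      · exact ih m h k hk
    | some r0 =>
      simp only [minR] at h
      rcases hm' : minR rs with _ | m' <;> rw [hm'] at h <;> simp only [Option.some.injEq] at h
      · rcases hk with hk | hk
        · injection hk with hk; omega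
        · exact absurd hk (by simpa using minR_none rs hm' k)
      · rcases hk with hk | hk
        · injection hk with hk
          omega
        · have := ih m' hm' k hk
          omega

theorem fw_congr (k k' : Int) (h : k = k') : ∀ (s : Int) (rs : List (Option Int)), fw k s rs = fw k' s rs := by
  subst h; intro s rs; rfl

theorem runB_some (rs : List (Option Int)) : ∀ (s br bi : Int),
    runB (some br, some bi) s rs =
      match minR rs with
      | none => (some br, some bi)
      | some m => (some (min br m), if m < br then fw m s rs else some bi) := by
  induction rs with
  | nil => intro s br bi; simp [runB, minR]
  | cons r? rs ih =>
    intro s br bi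
    match r? with
    | none =>
      simp only [runB, minR]
      rw [ih]
      rcases hm : minR rs with _ | m <;> simp only [fw] <;>
        split_ifs <;> simp_all
    | some r0 =>
      simp only [runB, minR]
      by_cases hlt : r0 < br
      · rw [if_pos hlt, ih]
        clear ih
        rcases hm : minR rs with _ | m' <;> simp only [fw] <;>
          split_ifs <;> simp_all <;> first
            | omega
            | (exact fw_congr _ _ (by omega) _ _)
            | (exact ⟨by omega, fw_congr _ _ (by omega) _ _⟩)
      · rw [if_neg hlt, ih]
        clear ih
        rcases hm : minR rs with _ | m' <;> simp only [fw] <;>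
          split_ifs <;> simp_all <;> first
            | omega
            | (exact fw_congr _ _ (by omega) _ _)
            | (exact ⟨by omega, fw_congr _ _ (by omega) _ _⟩)

theorem runB_none (rs : List (Option Int)) : ∀ (s : Int),
    runB (none, none) s rs =
      match minR rs with
      | none => (none, none)
      | some m => (some m, fw m s rs) := by
  induction rs with
  | nil => intro s; simp [runB, minR]
  | cons r? rs ih =>
    intro s
    match r? with
    | none =>
      simp only [runB, minR]
      rw [ih]
      rcases hm : minR rs with _ | m <;> simp only [fw] <;>
        split_ifs <;> simp_all
    | some r0 =>
      simp only [runB, minR]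
      rw [runB_some]
      rcases hm : minR rs with _ | m' <;> simp only [fw] <;>
        split_ifs <;> simp_all <;> first
            | omega
            | (exact fw_congr _ _ (by omega) _ _)
            | (exact ⟨by omega, fw_congr _ _ (by omega) _ _⟩)

theorem foldl_stepB_eq_runB (ws : List String) : ∀ (s : Int) (acc : Option Int × Option Int),
    (PySem.List.enumerate ws s).foldl stepB acc = runB acc s (ws.map rkW) := by
  induction ws with
  | nil => intro s acc; simp [PySem.List.enumerate_nil, runB]
  | cons w ws ih =>
    intro s acc
    rw [PySem.List.enumerate_cons]
    simp only [List.foldl_cons, List.map, runB]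
    rw [ih]
    congr 1
    simp only [stepB, rankDict_get]
    rcases acc with ⟨br, bi⟩
    rcases h : rkW w with _ | r <;> simp [rkW] at h <;> simp [h]

-- A's scan over the 7-token priority list equals "first index achieving the minimum rank"
theorem scanA_eq (ws : List String) :
    scanA ws pvPriority =
      match minR (ws.map rkW) with
      | none => none
      | some m => fw m 0 (ws.map rkW) := by
  have e0 := findTok_eq "RTX" 0 (by intro u; unfold rankFun; split_ifs <;> simp_all <;> (intro he; subst he; simp_all)) ws 0
  have e1 := findTok_eq "GTX" 1 (by intro u; unfold rankFun; split_ifs <;> simp_all <;> (intro he; subst he; simp_all)) ws 0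
  have e2 := findTok_eq "RX" 2 (by intro u; unfold rankFun; split_ifs <;> simp_all <;> (intro he; subst he; simp_all)) ws 0
  have e3 := findTok_eq "ARC" 3 (by intro u; unfold rankFun; split_ifs <;> simp_all <;> (intro he; subst he; simp_all)) ws 0
  have e4 := findTok_eq "QUADRO" 4 (by intro u; unfold rankFun; split_ifs <;> simp_all <;> (intro he; subst he; simp_all)) ws 0
  have e5 := findTok_eq "RADEON" 5 (by intro u; unfold rankFun; split_ifs <;> simp_all <;> (intro he; subst he; simp_all)) ws 0
  have e6 := findTok_eq "GEFORCE" 6 (by intro u; unfold rankFun; split_ifs <;> simp_all <;> (intro he; subst he; simp_all)) ws 0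
  simp only [pvPriority, scanA, e0, e1, e2, e3, e4, e5, e6]
  set rs := ws.map rkW with hrs
  have hbnd : ∀ k : Int, some k ∈ rs → 0 ≤ k ∧ k < 7 := by
    intro k hk
    rw [hrs] at hk
    simp only [List.mem_map] at hk
    obtain ⟨w, _, hw⟩ := hk
    have hw2 : rankFun (PySem.Str.upper w) = some k := by
      unfold rkW at hw
      first | exact hw | exact hw.symm
    exact rankFun_bound _ _ hw2
  rcases hm : minR rs with _ | m
  · have := minR_none rs hm
    simp [fw_eq_none _ _ (this 0), fw_eq_none _ _ (this 1), fw_eq_none _ _ (this 2),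
          fw_eq_none _ _ (this 3), fw_eq_none _ _ (this 4), fw_eq_none _ _ (this 5),
          fw_eq_none _ _ (this 6)]
  · have hmem := minR_mem rs m hm
    have hle := minR_le rs m hm
    obtain ⟨hb1, hb2⟩ := hbnd m hmem
    have hnone : ∀ k : Int, k < m → fw k 0 rs = none := by
      intro k hk
      apply fw_eq_none
      intro hmemk
      have := hle k hmemk
      omega
    have hsomeM := fw_isSome m rs hmem 0
    rcases hfm : fw m 0 rs with _ | j
    · rw [hfm] at hsomeM; simp at hsomeM
    · interval_cases m <;>
        simp_all [hnone 0, hnone 1, hnone 2, hnone 3, hnone 4, hnone 5, hnone 6]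

-- ===== VERDICT (by name: the statement is the Claim_ definition above) =====
theorem shorten_gpu_model_for_display_py_spec : Claim_equal_shorten_gpu_model_for_display_py := by
  intro model max_len _
  unfold Spec_shorten_gpu_model_for_display_py
  unfold shorten_gpu_model_for_display_py shorten_gpu_model_for_display_py_alt
  simp only [foldl_stepB_eq_runB, runB_none, scanA_eq]
  rcases hm : minR ((PySem.Str.split₀ model).map rkW) with _ | m <;> simp
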